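-- pv_equiv track=rewrite | github.com/AlexNoens/AoC-2015 | Day16/Day16.py | solve_pt2
-- ===== SOURCE A (Python) =====
-- def solve_pt2(list, input):
--     for each in input:
--         remove = []
--         for sue in list:
--             try:
--                 if each == "cats" or each == "trees":
--                     if sue[each] <= input[each]:
--                         remove.append(sue)
--                 elif each == "pomeranians" or each == "goldfish":
--                     if sue[each] >= input[each]:
--                         remove.append(sue)
--                 elif sue[each] != input[each]:
--                         remove.append(sue)
--             except:
--                 pass
--         for each in remove:
--             list.remove(each)
--     return list
-- ===== SOURCE B (Python) =====
-- def solve_pt2(list, input):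
--     def bad(sue):
--         for prop in input:
--             if prop in sue:
--                 v = sue[prop]
--                 t = input[prop]
--                 if prop in ("cats", "trees"):
--                     if v <= t:
--                         return True
--                 elif prop in ("pomeranians", "goldfish"):
--                     if v >= t:
--                         return True
--                 elif v != t:
--                     return True
--         return False
--     list[:] = [sue for sue in list if not bad(sue)]
--     return list
-- ===== Notes on version B (the rewrite author's own statement) =====
-- stated objective: simpler
-- what changed: A makes one pass per input property, collecting a remove list and then deleting each entry with repeated O(n) list.remove scans; B decides each sue once with a single predicate over all properties and writes the survivors back with one filter (same in-place list[:] mutation), removing the rescans.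
import Mathlib
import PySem

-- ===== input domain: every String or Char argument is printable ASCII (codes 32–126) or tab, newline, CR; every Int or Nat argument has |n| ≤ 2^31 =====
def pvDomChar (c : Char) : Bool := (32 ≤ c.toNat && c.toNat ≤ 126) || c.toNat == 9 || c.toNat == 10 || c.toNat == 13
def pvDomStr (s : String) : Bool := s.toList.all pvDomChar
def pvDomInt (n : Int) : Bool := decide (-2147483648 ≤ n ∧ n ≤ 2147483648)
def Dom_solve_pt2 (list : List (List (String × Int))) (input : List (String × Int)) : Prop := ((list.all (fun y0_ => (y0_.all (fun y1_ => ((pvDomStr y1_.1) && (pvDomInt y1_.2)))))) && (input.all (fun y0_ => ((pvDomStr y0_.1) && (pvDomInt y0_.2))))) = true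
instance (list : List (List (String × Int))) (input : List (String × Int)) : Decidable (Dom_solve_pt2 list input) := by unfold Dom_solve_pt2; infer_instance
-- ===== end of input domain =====

-- B replaces A's per-property remove-list + repeated list.remove passes with one filter keeping
-- the sues no property rule eliminates (simpler; same in-place list[:] mutation as A).


-- ===== PORT A =====
-- dicts are association lists (first match wins); Python's d[k] is Dict.get? (none = KeyError,
-- swallowed by A's bare 'except: pass'); 'for each in input' walks the keys in order.
def solve_pt2 (list : List (List (String × Int))) (input : List (String × Int)) : List (List (String × Int)) :=
  input.foldl (fun lst kv =>
    let each := kv.1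
    let remove : List (List (String × Int)) :=
      lst.foldl (fun rem sue =>
        if each == "cats" || each == "trees" then
          match (PySem.Dict.mk sue).get? each, (PySem.Dict.mk input).get? each with
          | some sv, some iv => if sv ≤ iv then rem ++ [sue] else rem
          | _, _ => rem          -- KeyError → except: pass
        else if each == "pomeranians" || each == "goldfish" then
          match (PySem.Dict.mk sue).get? each, (PySem.Dict.mk input).get? each with
          | some sv, some iv => if sv ≥ iv then rem ++ [sue] else rem
          | _, _ => rem
        else
          match (PySem.Dict.mk sue).get? each, (PySem.Dict.mk input).get? each with
          | some sv, some iv => if sv ≠ iv then rem ++ [sue] else rem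
          | _, _ => rem) []
    -- every element of remove is still present, so list.remove never raises; getD is unreachable
    remove.foldl (fun l s => (PySem.List.remove? l s).getD l) lst) list

-- ===== PORT B =====
-- B's bad(sue): first property of input whose rule fires; B keeps the sues where none fires.
def pvBad (input : List (String × Int)) (sue : List (String × Int)) : Bool :=
  input.any (fun kv =>
    let prop := kv.1
    match (PySem.Dict.mk sue).get? prop with
    | none => false                -- 'prop in sue' fails: skip
    | some v =>
      match (PySem.Dict.mk input).get? prop with
      | none => false
      | some t =>
        if prop == "cats" || prop == "trees" then decide (v ≤ t)
        else if prop == "pomeranians" || prop == "goldfish" then decide (v ≥ t)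
        else v != t)

def solve_pt2_alt (list : List (List (String × Int))) (input : List (String × Int)) : List (List (String × Int)) :=
  list.filter (fun sue => ! pvBad input sue)

-- ===== PRECONDITION & SPEC =====
def Spec_solve_pt2 (list : List (List (String × Int))) (input : List (String × Int)) (out : List (List (String × Int))) : Prop := out = solve_pt2_alt list input
instance (list : List (List (String × Int))) (input : List (String × Int)) (out : List (List (String × Int))) : Decidable (Spec_solve_pt2 list input out) := by unfold Spec_solve_pt2; infer_instance

-- ===== CLAIM (what is proved, stated in full; the proofs are below) =====
def Claim_equal_solve_pt2 : Prop := ∀ (list : List (List (String × Int))) (input : List (String × Int)), Dom_solve_pt2 list input → Spec_solve_pt2 list input (solve_pt2 list input)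

-- ===== LEMMAS AND PROOFS =====

-- the one-property rule both programs apply, as a predicate of the sue
def pvTrig (input : List (String × Int)) (each : String) (sue : List (String × Int)) : Bool :=
  match (PySem.Dict.mk sue).get? each, (PySem.Dict.mk input).get? each with
  | some sv, some iv =>
    if each == "cats" || each == "trees" then decide (sv ≤ iv)
    else if each == "pomeranians" || each == "goldfish" then decide (sv ≥ iv)
    else sv != iv
  | _, _ => false

-- A's inner loop body appends sue exactly when pvTrig fires
theorem pvA_body_eq (input : List (String × Int)) (each : String)
    (rem : List (List (String × Int))) (sue : List (String × Int)) :
    (if each == "cats" || each == "trees" then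
        match (PySem.Dict.mk sue).get? each, (PySem.Dict.mk input).get? each with
        | some sv, some iv => if sv ≤ iv then rem ++ [sue] else rem
        | _, _ => rem
      else if each == "pomeranians" || each == "goldfish" then
        match (PySem.Dict.mk sue).get? each, (PySem.Dict.mk input).get? each with
        | some sv, some iv => if sv ≥ iv then rem ++ [sue] else rem
        | _, _ => rem
      else
        match (PySem.Dict.mk sue).get? each, (PySem.Dict.mk input).get? each with
        | some sv, some iv => if sv ≠ iv then rem ++ [sue] else rem
        | _, _ => rem)
      = if pvTrig input each sue then rem ++ [sue] else rem := by
  unfold pvTrig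
  cases hs : (PySem.Dict.mk sue).get? each <;>
    cases hi : (PySem.Dict.mk input).get? each <;>
    split_ifs <;> simp_all

-- Python's list.remove on a present element is List.erase; on a missing one A never reaches it,
-- and both sides then leave the list unchanged.
theorem pvRemove_eq_erase (l : List (List (String × Int))) (s : List (String × Int)) :
    (PySem.List.remove? l s).getD l = l.erase s := by
  by_cases h : s ∈ l
  · rw [PySem.List.remove?_eq_some_erase l s h]; rfl
  · have h0 : PySem.List.remove? l s = none := by
      simp [PySem.List.remove?_eq_none_iff, h]
    rw [h0, List.erase_of_not_mem h]; rfl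

-- erasing elements that a (value-determined) predicate selects from the same list is filtering
theorem pvErase_aux {α : Type} [BEq α] [LawfulBEq α] (x : α) (rs t : List α)
    (hx : ∀ s ∈ rs, s ≠ x) :
    rs.foldl (fun l s => l.erase s) (x :: t) = x :: rs.foldl (fun l s => l.erase s) t := by
  induction rs generalizing t with
  | nil => rfl
  | cons r rs ih =>
    simp only [List.foldl_cons]
    rw [List.erase_cons_tail (by simpa using (hx r (by simp)).symm)]
    exact ih _ (fun s hs => hx s (by simp [hs]))

theorem pvErase_filter {α : Type} [BEq α] [LawfulBEq α] (p : α → Bool) (l : List α) :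
    (l.filter p).foldl (fun acc s => acc.erase s) l = l.filter (fun s => ! p s) := by
  induction l with
  | nil => rfl
  | cons x t ih =>
    by_cases hp : p x
    · simp only [List.filter_cons, hp, if_pos, List.foldl_cons, List.erase_cons_head]
      simpa [hp] using ih
    · simp only [List.filter_cons, hp, Bool.false_eq_true, if_neg, not_false_iff]
      rw [pvErase_aux x (t.filter p) t
        (fun s hs => by rintro rfl; exact hp (List.of_mem_filter hs))]
      simp [ih]

-- one outer iteration of A is a filter by ¬ pvTrig
theorem pvA_step (input : List (String × Int)) (each : String)
    (lst : List (List (String × Int))) :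
    (lst.foldl (fun rem sue =>
        if each == "cats" || each == "trees" then
          match (PySem.Dict.mk sue).get? each, (PySem.Dict.mk input).get? each with
          | some sv, some iv => if sv ≤ iv then rem ++ [sue] else rem
          | _, _ => rem
        else if each == "pomeranians" || each == "goldfish" then
          match (PySem.Dict.mk sue).get? each, (PySem.Dict.mk input).get? each with
          | some sv, some iv => if sv ≥ iv then rem ++ [sue] else rem
          | _, _ => rem
        else
          match (PySem.Dict.mk sue).get? each, (PySem.Dict.mk input).get? each with
          | some sv, some iv => if sv ≠ iv then rem ++ [sue] else rem
          | _, _ => rem) []).foldl (fun l s => (PySem.List.remove? l s).getD l) lst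
      = lst.filter (fun sue => ! pvTrig input each sue) := by
  have h1 := PySem.List.foldl_congr_mem lst _
      (fun rem sue => if pvTrig input each sue then rem ++ [sue] else rem) []
      (fun rem sue _ => pvA_body_eq input each rem sue)
  rw [h1, PySem.List.foldl_append_if_eq_filter (pvTrig input each) lst [], List.nil_append]
  exact Eq.trans
    (PySem.List.foldl_congr_mem (lst.filter (pvTrig input each)) _
      (fun (l : List (List (String × Int))) s => l.erase s) lst
      (fun l s _ => pvRemove_eq_erase l s))
    (pvErase_filter _ _)

-- chaining the per-key filters is one filter by "no key fires"
theorem pvFold_filter (input ks : List (String × Int)) (l : List (List (String × Int))) :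
    ks.foldl (fun lst kv => lst.filter (fun sue => ! pvTrig input kv.1 sue)) l
      = l.filter (fun sue => ! ks.any (fun kv => pvTrig input kv.1 sue)) := by
  induction ks generalizing l with
  | nil => simp
  | cons k ks ih =>
    simp only [List.foldl_cons, ih, List.filter_filter]
    apply List.filter_congr
    intro sue _
    simp [Bool.and_comm]

theorem pvBad_eq_any (input : List (String × Int)) (sue : List (String × Int)) :
    pvBad input sue = input.any (fun kv => pvTrig input kv.1 sue) := by
  unfold pvBad
  apply PySem.List.any_congr_mem
  intro kv _
  unfold pvTrig
  cases hs : (PySem.Dict.mk sue).get? kv.1 <;>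
    cases hi : (PySem.Dict.mk input).get? kv.1 <;>
    simp only [hs, hi]

-- ===== VERDICT (by name: the statement is the Claim_ definition above) =====
theorem solve_pt2_spec : Claim_equal_solve_pt2 := by
  intro list input _
  show solve_pt2 list input = solve_pt2_alt list input
  refine Eq.trans
    (PySem.List.foldl_congr_mem input _
      (fun lst (kv : String × Int) => lst.filter (fun sue => ! pvTrig input kv.1 sue)) list
      (fun lst kv _ => pvA_step input kv.1 lst)) ?_
  rw [pvFold_filter]
  exact List.filter_congr (fun sue _ => by rw [pvBad_eq_any])
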